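-- pv_equiv track=rewrite | github.com/devmertsert/python_case_study | 2.py | uce_bolunen_fibonacciler_toplami
-- ===== SOURCE A (Python) =====
-- def uce_bolunen_fibonacciler_toplami(maksimum):
--     sayi1 = 0
--     sayi2 = 1
--     toplam = 0
--
--     while sayi2 < maksimum:
--         if sayi2 % 3 == 0:
--             toplam += sayi2
--         gecici = sayi1
--         sayi1 = sayi2
--         sayi2 += gecici
--
--     return toplam
-- ===== SOURCE B (Python) =====
-- def uce_bolunen_fibonacciler_toplami(maksimum):
--     # Fibonacci numbers divisible by 3 are exactly F4, F8, F12, ... which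
--     # satisfy a(n) = 7*a(n-1) - a(n-2), seeded 0, 3.  Build the list of
--     # those terms below maksimum recursively and sum it.
--     def terms(x, y):
--         if y >= maksimum:
--             return []
--         return [y] + terms(y, 7 * y - x)
--     return sum(terms(0, 3))
-- ===== Notes on version B (the rewrite author's own statement) =====
-- stated objective: alternative
-- what changed: B recursively builds the list of divisible-by-3 Fibonacci numbers directly via the recurrence a(n)=7*a(n-1)-a(n-2) seeded (0,3) and sums it, instead of iterating over all Fibonacci numbers with an accumulator and a modulo filter.
import Mathlib
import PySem

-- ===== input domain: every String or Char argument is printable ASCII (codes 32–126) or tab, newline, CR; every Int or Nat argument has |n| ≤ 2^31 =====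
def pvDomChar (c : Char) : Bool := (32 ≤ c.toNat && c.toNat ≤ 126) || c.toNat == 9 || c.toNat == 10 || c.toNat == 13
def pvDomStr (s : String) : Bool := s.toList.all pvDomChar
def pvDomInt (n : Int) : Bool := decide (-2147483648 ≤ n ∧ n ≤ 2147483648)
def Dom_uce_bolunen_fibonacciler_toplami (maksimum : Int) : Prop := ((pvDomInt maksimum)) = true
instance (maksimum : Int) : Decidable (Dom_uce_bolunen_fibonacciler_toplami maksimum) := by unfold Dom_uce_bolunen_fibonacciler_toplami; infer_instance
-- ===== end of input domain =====

-- B recursively builds the list of divisible-by-3 Fibonacci numbers via a(n)=7·a(n-1)-a(n-2)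
-- and sums it, replacing A's accumulator loop over all Fibonacci numbers with a modulo filter
-- (objective: alternative algorithm).


-- ===== PORT A =====
-- A's while loop with an accumulator; the fuel only makes it total: 64 iterations
-- are more than enough for every maksimum ≤ 2^31 (the loop stops once sayi2 ≥ maksimum,
-- and F47 > 2^31).
def uceLoopA (fuel : Nat) (maksimum sayi1 sayi2 toplam : Int) : Int :=
  match fuel with
  | 0 => toplam
  | Nat.succ n =>
    if sayi2 < maksimum then
      uceLoopA n maksimum sayi2 (sayi2 + sayi1)
        (if sayi2 % 3 = 0 then toplam + sayi2 else toplam)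
    else toplam

def uce_bolunen_fibonacciler_toplami (maksimum : Int) : Int :=
  uceLoopA 64 maksimum 0 1 0

-- ===== PORT B =====
-- B's recursive list builder `terms`; fuel 16 is more than enough for every
-- maksimum ≤ 2^31 (only makes the recursion total).
def uceTermsB (fuel : Nat) (maksimum x y : Int) : List Int :=
  match fuel with
  | 0 => []
  | Nat.succ n =>
    if y ≥ maksimum then []
    else y :: uceTermsB n maksimum y (7 * y - x)

def uce_bolunen_fibonacciler_toplami_alt (maksimum : Int) : Int :=
  (uceTermsB 16 maksimum 0 3).sum

-- ===== PRECONDITION & SPEC =====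
def Spec_uce_bolunen_fibonacciler_toplami (maksimum : Int) (out : Int) : Prop := out = uce_bolunen_fibonacciler_toplami_alt maksimum
instance (maksimum : Int) (out : Int) : Decidable (Spec_uce_bolunen_fibonacciler_toplami maksimum out) := by unfold Spec_uce_bolunen_fibonacciler_toplami; infer_instance

-- ===== CLAIM =====
def Claim_equal_uce_bolunen_fibonacciler_toplami : Prop := ∀ (maksimum : Int), Dom_uce_bolunen_fibonacciler_toplami maksimum → Spec_uce_bolunen_fibonacciler_toplami maksimum (uce_bolunen_fibonacciler_toplami maksimum)

-- ===== LEMMAS AND PROOFS =====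

-- the values A's loop variable sayi2 takes (proof-only helper)
def trajA : Nat → Int → Int → List Int
  | 0, _, _ => []
  | Nat.succ n, s1, s2 => s2 :: trajA n s2 (s2 + s1)

-- the values B's recursion variable y takes (proof-only helper)
def trajB : Nat → Int → Int → List Int
  | 0, _, _ => []
  | Nat.succ n, x, y => y :: trajB n y (7 * y - x)

theorem loopA_eq (n : Nat) (m : Int) : ∀ (s1 s2 t : Int),
    (trajA n s1 s2).Pairwise (· ≤ ·) →
    uceLoopA n m s1 s2 t =
      t + ((trajA n s1 s2).filter (fun z => decide (z < m) && decide (z % 3 = 0))).sum := by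
  induction n with
  | zero => intro s1 s2 t _; simp [uceLoopA, trajA]
  | succ n ih =>
    intro s1 s2 t hp
    simp only [trajA, List.pairwise_cons] at hp
    obtain ⟨hhead, htail⟩ := hp
    simp only [trajA, uceLoopA, List.filter_cons]
    by_cases h : s2 < m
    · rw [if_pos h, ih _ _ _ htail]
      by_cases h3 : s2 % 3 = 0
      · have hc : (decide (s2 < m) && decide (s2 % 3 = 0)) = true := by
          simp only [Bool.and_eq_true, decide_eq_true_eq]; exact ⟨h, h3⟩
        rw [if_pos h3, hc]
        simp only [if_true, List.sum_cons]; ring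
      · have hc : (decide (s2 < m) && decide (s2 % 3 = 0)) = false := by
          simp only [Bool.and_eq_false_iff, decide_eq_false_iff_not]; right; exact h3
        rw [if_neg h3, hc]
        simp
    · have hrest : (trajA n s2 (s2 + s1)).filter
          (fun z => decide (z < m) && decide (z % 3 = 0)) = [] := by
        rw [List.filter_eq_nil_iff]
        intro z hz
        have := hhead z hz
        simp only [Bool.and_eq_true, decide_eq_true_eq]
        intro hc; omega
      have hc : (decide (s2 < m) && decide (s2 % 3 = 0)) = false := by
        simp only [Bool.and_eq_false_iff, decide_eq_false_iff_not]; left; exact h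
      rw [if_neg h, hc, hrest]
      simp

-- B's builder returns exactly the below-m prefix of its trajectory
theorem termsB_eq (n : Nat) (m : Int) : ∀ (x y : Int),
    (trajB n x y).Pairwise (· ≤ ·) →
    uceTermsB n m x y = (trajB n x y).filter (fun z => decide (z < m)) := by
  induction n with
  | zero => intro x y _; simp [uceTermsB, trajB]
  | succ n ih =>
    intro x y hp
    simp only [trajB, List.pairwise_cons] at hp
    obtain ⟨hhead, htail⟩ := hp
    simp only [uceTermsB, trajB, List.filter_cons]
    by_cases h : y ≥ m
    · have hrest : (trajB n y (7 * y - x)).filter (fun z => decide (z < m)) = [] := by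
        rw [List.filter_eq_nil_iff]
        intro z hz
        have := hhead z hz
        simp only [decide_eq_true_eq]
        omega
      rw [if_pos h, if_neg (by simpa using h), hrest]
    · rw [if_neg h, if_pos (by simp; omega), ih _ _ htail]

set_option maxRecDepth 40000 in
-- the %3-divisible entries of A's trajectory are exactly B's trajectory
theorem traj_key : (trajA 64 0 1).filter (fun z => decide (z % 3 = 0)) = trajB 16 0 3 := by
  decide

-- ===== VERDICT =====
set_option maxRecDepth 40000 in
theorem uce_bolunen_fibonacciler_toplami_spec : Claim_equal_uce_bolunen_fibonacciler_toplami := by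
  intro m _
  show uce_bolunen_fibonacciler_toplami m = uce_bolunen_fibonacciler_toplami_alt m
  unfold uce_bolunen_fibonacciler_toplami uce_bolunen_fibonacciler_toplami_alt
  rw [loopA_eq 64 m 0 1 0 (by decide), termsB_eq 16 m 0 3 (by decide)]
  rw [← List.filter_filter, traj_key]
  simp
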